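-- pv_equiv track=rewrite | github.com/nuno-git/druppie-fork | druppie/mcp-servers/module-archimate/v1/module.py | _find_view
-- ===== SOURCE A (Python) =====
-- def _find_view(model, identifier):
--     """Find view by ID or name."""
--     if identifier in model["views"]:
--         return model["views"][identifier]
--
--     lower_id = identifier.lower()
--     for view in model["views"].values():
--         if view["name"].lower() == lower_id:
--             return view
--
--     for view in model["views"].values():
--         if lower_id in view["name"].lower():
--             return view
--
--     return None
-- ===== SOURCE B (Python) =====
-- def _find_view(model, identifier):
--     """Find view by ID or name."""
--     views = model["views"]
--     if identifier in views:
--         return views[identifier]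
--
--     lower_id = identifier.lower()
--     fallback = None
--     for view in views.values():
--         name = view["name"].lower()
--         if name == lower_id:
--             return view
--         if fallback is None and lower_id in name:
--             fallback = view
--     return fallback
-- ===== Notes on version B (the rewrite author's own statement) =====
-- stated objective: simpler
-- what changed: The two separate scans over the views (first for an exact lowercase-name match, then for a substring match) are fused into a single pass that returns immediately on an exact match and remembers the first substring match in a fallback variable returned after the loop.
import Mathlib
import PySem

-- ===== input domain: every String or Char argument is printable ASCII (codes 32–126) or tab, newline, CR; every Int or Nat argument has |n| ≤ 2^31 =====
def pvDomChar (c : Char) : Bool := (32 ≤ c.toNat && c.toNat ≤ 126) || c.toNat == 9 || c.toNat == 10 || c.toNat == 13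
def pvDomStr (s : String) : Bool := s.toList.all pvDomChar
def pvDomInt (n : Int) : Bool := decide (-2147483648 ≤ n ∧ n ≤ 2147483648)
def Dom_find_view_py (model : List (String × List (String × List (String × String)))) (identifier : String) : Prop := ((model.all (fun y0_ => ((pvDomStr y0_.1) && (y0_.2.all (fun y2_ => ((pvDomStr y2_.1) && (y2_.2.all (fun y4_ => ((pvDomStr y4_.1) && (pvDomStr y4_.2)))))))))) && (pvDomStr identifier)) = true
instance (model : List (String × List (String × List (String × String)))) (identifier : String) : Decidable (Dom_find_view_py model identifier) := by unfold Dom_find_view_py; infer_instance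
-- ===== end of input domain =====

-- B fuses A's two scans over the views (exact lowercase-name match, then substring match)
-- into one pass that remembers the first substring hit in a fallback variable.


-- model["views"] (shared: both Pythons evaluate exactly this lookup; none = KeyError, excluded by Pre_)
def pvViews (model : List (String × List (String × List (String × String)))) :
    Option (List (String × List (String × String))) :=
  (PySem.Dict.mk model).get? "views"

-- ===== PORT A =====
-- first loop of A: 'for view in views.values(): if view["name"].lower() == lower_id: return view'
-- outer none = KeyError on view["name"]; some none = loop fell through
def aScanExact (views : List (List (String × String))) (lid : String) :
    Option (Option (List (String × String))) :=
  match views with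
  | [] => some none
  | v :: rest =>
    match (PySem.Dict.mk v).get? "name" with
    | none => none
    | some nm => if PySem.Str.lower nm == lid then some (some v) else aScanExact rest lid

-- second loop of A: 'for view in views.values(): if lower_id in view["name"].lower(): return view'
def aScanSub (views : List (List (String × String))) (lid : String) :
    Option (Option (List (String × String))) :=
  match views with
  | [] => some none
  | v :: rest =>
    match (PySem.Dict.mk v).get? "name" with
    | none => none
    | some nm => if PySem.Str.isIn lid (PySem.Str.lower nm) then some (some v) else aScanSub rest lid

def find_view_py (model : List (String × List (String × List (String × String)))) (identifier : String) : Option (List (String × String)) :=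
  match pvViews model with
  | none => none  -- KeyError: outside Pre_
  | some viewsL =>
    let vd := PySem.Dict.mk viewsL
    if vd.contains identifier then vd.get? identifier
    else
      let lid := PySem.Str.lower identifier
      match aScanExact vd.values lid with
      | none => none  -- KeyError: outside Pre_
      | some (some v) => some v
      | some none =>
        match aScanSub vd.values lid with
        | none => none  -- KeyError: outside Pre_
        | some r => r

-- ===== PORT B =====
-- B's single loop with a remembered first substring hit (fallback); outer none = KeyError
def bScan (views : List (List (String × String))) (lid : String)
    (fallback : Option (List (String × String))) :
    Option (Option (List (String × String))) :=
  match views with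
  | [] => some fallback
  | v :: rest =>
    match (PySem.Dict.mk v).get? "name" with
    | none => none
    | some nm =>
      let name := PySem.Str.lower nm
      if name == lid then some (some v)
      else bScan rest lid (if fallback.isNone && PySem.Str.isIn lid name then some v else fallback)

def find_view_py_alt (model : List (String × List (String × List (String × String)))) (identifier : String) : Option (List (String × String)) :=
  match pvViews model with
  | none => none  -- KeyError: outside Pre_
  | some viewsL =>
    let vd := PySem.Dict.mk viewsL
    if vd.contains identifier then vd.get? identifier
    else
      match bScan vd.values (PySem.Str.lower identifier) none with
      | none => none  -- KeyError: outside Pre_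
      | some r => r

-- ===== PRECONDITION & SPEC =====
-- a view that has a "name" whose lowercase is NOT lid (A's first loop steps past it safely)
def pvNamedNonExact (lid : String) (v : List (String × String)) : Bool :=
  match (PySem.Dict.mk v).get? "name" with
  | none => false
  | some nm => !(PySem.Str.lower nm == lid)

-- Pre_ excludes EXACTLY the inputs where Python A raises KeyError: no "views" key, or — when the
-- identifier is not a key — the first view that is not a named non-match lacks a "name" key
-- (a nameless view after an exact match is fine: both programs return before reaching it).
def Pre_find_view_py (model : List (String × List (String × List (String × String)))) (identifier : String) : Prop :=
  (pvViews model).isSome = true ∧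
  (let vs := (PySem.Dict.mk ((pvViews model).getD [])).values
   (PySem.Dict.mk ((pvViews model).getD [])).contains identifier = true ∨
   (vs[(vs.takeWhile (pvNamedNonExact (PySem.Str.lower identifier))).length]?.all
      (fun v => (PySem.Dict.mk v).contains "name")) = true)
instance (model : List (String × List (String × List (String × String)))) (identifier : String) : Decidable (Pre_find_view_py model identifier) := by unfold Pre_find_view_py; infer_instance
def pvWitness_find_view_py : (List (String × List (String × List (String × String)))) × String :=
  ([("views", [("v1", [("name", "Main")]), ("v2", [])])], "main")
def Spec_find_view_py (model : List (String × List (String × List (String × String)))) (identifier : String) (out : Option (List (String × String))) : Prop := out = find_view_py_alt model identifier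
instance (model : List (String × List (String × List (String × String)))) (identifier : String) (out : Option (List (String × String))) : Decidable (Spec_find_view_py model identifier out) := by unfold Spec_find_view_py; infer_instance

-- ===== CLAIM (what is proved, stated in full; the proofs are below) =====
def Claim_equal_find_view_py : Prop := ∀ (model : List (String × List (String × List (String × String)))) (identifier : String), Dom_find_view_py model identifier → Pre_find_view_py model identifier → Spec_find_view_py model identifier (find_view_py model identifier)

-- ===== LEMMAS AND PROOFS =====

-- B's single pass equals A's two passes, for any carried fallback.
theorem bScan_eq (views : List (List (String × String))) (lid : String) :
    ∀ fb : Option (List (String × String)),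
    bScan views lid fb =
      match aScanExact views lid, fb with
      | none, _ => none
      | some (some v), _ => some (some v)
      | some none, some f => some (some f)
      | some none, none => aScanSub views lid := by
  induction views with
  | nil => intro fb; cases fb <;> rfl
  | cons v rest ih =>
    intro fb
    cases h : (PySem.Dict.mk v).get? "name" with
    | none => cases fb <;> simp [bScan, aScanExact, h]
    | some nm =>
      simp only [bScan, aScanExact, aScanSub, h]
      by_cases he : (PySem.Str.lower nm == lid) = true
      · simp [he]
      · rw [if_neg he, if_neg he]
        by_cases hs : PySem.Str.isIn lid (PySem.Str.lower nm) = true <;>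
          cases fb <;> rw [ih] <;>
          simp only [Option.isNone_none, Option.isNone_some, Bool.true_and, Bool.false_and,
            hs, if_true, if_false, Bool.false_eq_true] <;>
          (cases ha : aScanExact rest lid with
           | none => rfl
           | some o => cases o <;> rfl)

-- ===== VERDICT (by name: the statement is the Claim_ definition above) =====
theorem find_view_py_spec : Claim_equal_find_view_py := by
  intro model identifier _ _
  unfold Spec_find_view_py find_view_py find_view_py_alt
  cases hv : pvViews model with
  | none => rfl
  | some viewsL =>
    simp only []
    by_cases hc : (PySem.Dict.mk viewsL).contains identifier = true
    · simp [hc]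
    · simp only [hc, Bool.false_eq_true, if_false,
        bScan_eq (PySem.Dict.mk viewsL).values (PySem.Str.lower identifier) none]
      cases ha : aScanExact (PySem.Dict.mk viewsL).values (PySem.Str.lower identifier) with
      | none => rfl
      | some o =>
        cases o with
        | some v => rfl
        | none =>
          cases hs : aScanSub (PySem.Dict.mk viewsL).values (PySem.Str.lower identifier) <;> rfl
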